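-- pv_equiv track=rewrite | github.com/sirfoga/pyhal | hal/maths/maths.py | blum_blum_shub
-- ===== SOURCE A (Python) =====
-- def blum_blum_shub(seed, amount, prime0, prime1):
--     """
--     :param seed: seeder
--     :param amount: amount of number to generate
--     :param prime0: one prime number
--     :param prime1: the second prime number
--     :return: pseudo-number generator
--     """
--
--     assert amount >= 0  # amount cannot be negative
--     if amount == 0:
--         return []
--
--     assert (seed > 0 and
--             prime0 > 0 and prime1 > 0)  # seed and primes cannot be negative
--     assert (prime0 % 4 == 3 and
--             prime1 % 4 == 3)  # primes must be congruent 3 mod 4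
--
--     mod = prime0 * prime1
--     rand = [seed]
--
--     for _ in range(amount):
--         last_num = rand[len(rand) - 1]
--         next_num = (last_num * last_num) % mod
--         rand.append(next_num)
--
--     return rand
-- ===== SOURCE B (Python) =====
-- def blum_blum_shub(seed, amount, prime0, prime1):
--     """Same BBS sequence via cycle detection: iterate squaring-mod only until a
--     value repeats (hash map value -> index), then extend the buffer by tiling
--     the detected cycle, instead of squaring once per output element."""
--     assert amount >= 0
--     if amount == 0:
--         return []
--     assert seed > 0 and prime0 > 0 and prime1 > 0
--     assert prime0 % 4 == 3 and prime1 % 4 == 3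
--     mod = prime0 * prime1
--
--     total = amount + 1
--     seen = {}
--     buf = []
--     x = seed
--     while len(buf) < total and x not in seen:
--         seen[x] = len(buf)
--         buf.append(x)
--         x = x * x % mod
--     if len(buf) < total:
--         start = seen[x]
--         cycle = buf[start:]
--         need = total - len(buf)
--         reps = need // len(cycle) + 1
--         buf += (cycle * reps)[:need]
--     return buf
-- ===== Notes on version B (the rewrite author's own statement) =====
-- stated objective: alternative
-- what changed: Replaces the square-once-per-output append loop with cycle detection: iterate squaring-mod only until a value repeats (hash map value -> first index), then fill the rest of the output by tiling the detected cycle with list repetition and slicing.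
import Mathlib
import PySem

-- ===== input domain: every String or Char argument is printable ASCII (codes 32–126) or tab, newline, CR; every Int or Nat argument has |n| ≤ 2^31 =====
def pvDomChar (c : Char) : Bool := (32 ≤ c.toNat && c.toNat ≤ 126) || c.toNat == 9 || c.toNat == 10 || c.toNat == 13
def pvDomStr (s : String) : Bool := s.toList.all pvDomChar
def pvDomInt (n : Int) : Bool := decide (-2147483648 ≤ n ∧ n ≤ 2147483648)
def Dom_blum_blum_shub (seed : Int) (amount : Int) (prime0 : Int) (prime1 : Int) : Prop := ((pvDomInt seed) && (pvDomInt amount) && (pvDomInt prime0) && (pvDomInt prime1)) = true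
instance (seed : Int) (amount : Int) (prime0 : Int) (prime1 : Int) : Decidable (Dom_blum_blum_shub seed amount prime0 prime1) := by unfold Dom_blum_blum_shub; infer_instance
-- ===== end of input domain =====

-- B replaces the square-per-element append loop with cycle detection (hash map of seen
-- values) plus tiling of the detected cycle; same return value on all non-raising inputs.

-- ===== PORT A =====
def blum_blum_shub (seed : Int) (amount : Int) (prime0 : Int) (prime1 : Int) : List Int :=
  -- the asserts: raising inputs are excluded by Pre_
  if amount == 0 then []
  else
    let m := prime0 * prime1
    (List.range amount.toNat).foldl
      (fun rand _ =>
        let last_num := (PySem.List.pyGet? rand ((rand.length : Int) - 1)).getD 0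
        let next_num := PySem.Int.mod (last_num * last_num) m
        rand ++ [next_num])
      [seed]

-- ===== PORT B =====
-- the while loop: stops when the buffer is full (fuel = total - len(buf) reaches 0)
-- or when x was already seen; inserts x -> len(buf) and squares mod m otherwise
def bbsLoopB (m : Int) : Nat → List Int → PySem.Dict Int Int → Int →
    (List Int × PySem.Dict Int Int × Int)
  | 0, buf, seen, x => (buf, seen, x)
  | Nat.succ fuel, buf, seen, x =>
    if (PySem.Dict.get? seen x).isSome then (buf, seen, x)
    else bbsLoopB m fuel (buf ++ [x]) (PySem.Dict.insert seen x (buf.length : Int))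
           (PySem.Int.mod (x * x) m)

def blum_blum_shub_alt (seed : Int) (amount : Int) (prime0 : Int) (prime1 : Int) : List Int :=
  if amount == 0 then []
  else
    let m := prime0 * prime1
    let total := amount.toNat + 1
    match bbsLoopB m total [] PySem.Dict.empty seed with
    | (buf, seen, x) =>
      if buf.length < total then
        let start := ((PySem.Dict.get? seen x).getD 0).toNat
        let cycle := buf.drop start
        let need := total - buf.length
        let reps := need / cycle.length + 1
        buf ++ List.take need (List.flatten (List.replicate reps cycle))
      else buf

-- ===== PRECONDITION & SPEC =====
-- Pre_ = exactly the inputs on which A's asserts pass (amount == 0 returns before the seed/prime asserts)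
def Pre_blum_blum_shub (seed : Int) (amount : Int) (prime0 : Int) (prime1 : Int) : Prop :=
  0 ≤ amount ∧ (amount = 0 ∨
    (0 < seed ∧ 0 < prime0 ∧ 0 < prime1 ∧
     PySem.Int.mod prime0 4 = 3 ∧ PySem.Int.mod prime1 4 = 3))
instance (seed : Int) (amount : Int) (prime0 : Int) (prime1 : Int) : Decidable (Pre_blum_blum_shub seed amount prime0 prime1) := by unfold Pre_blum_blum_shub; infer_instance
def pvWitness_blum_blum_shub : Int × Int × Int × Int := (3, 4, 7, 11)
def Spec_blum_blum_shub (seed : Int) (amount : Int) (prime0 : Int) (prime1 : Int) (out : List Int) : Prop := out = blum_blum_shub_alt seed amount prime0 prime1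
instance (seed : Int) (amount : Int) (prime0 : Int) (prime1 : Int) (out : List Int) : Decidable (Spec_blum_blum_shub seed amount prime0 prime1 out) := by unfold Spec_blum_blum_shub; infer_instance

-- ===== CLAIM (what is proved, stated in full; the proofs are below) =====
def Claim_equal_blum_blum_shub : Prop := ∀ (seed : Int) (amount : Int) (prime0 : Int) (prime1 : Int), Dom_blum_blum_shub seed amount prime0 prime1 → Pre_blum_blum_shub seed amount prime0 prime1 → Spec_blum_blum_shub seed amount prime0 prime1 (blum_blum_shub seed amount prime0 prime1)

-- ===== LEMMAS AND PROOFS =====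

-- the squaring step and the orbit [x0, f x0, f² x0, …] of length n
def bbsF (m : Int) : Int → Int := fun y => PySem.Int.mod (y * y) m
def orb (f : Int → Int) (x0 : Int) (n : Nat) : List Int := (List.range n).map (fun i => f^[i] x0)

lemma orb_length (f : Int → Int) (x0 : Int) (n : Nat) : (orb f x0 n).length = n := by
  simp [orb]

lemma orb_succ (f : Int → Int) (x0 : Int) (n : Nat) :
    orb f x0 (n + 1) = orb f x0 n ++ [f^[n] x0] := by
  simp [orb, List.range_succ]

lemma orb_getElem (f : Int → Int) (x0 : Int) (n q : Nat) (h : q < (orb f x0 n).length) :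
    (orb f x0 n)[q] = f^[q] x0 := by
  simp [orb]

-- orbit as a cons of the shifted orbit
lemma orb_cons (f : Int → Int) (x0 : Int) (n : Nat) :
    orb f x0 (n + 1) = x0 :: orb f (f x0) n := by
  have hf : ((fun i => f^[i] x0) ∘ Nat.succ) = fun i => f^[i] (f x0) := by
    funext i
    simp [Function.comp, Function.iterate_succ_apply]
  simp [orb, List.range_succ_eq_map, List.map_map, hf]

-- A's foldl-append loop starting from pref ++ [y] appends the next n squares of y
lemma bbsA_loop (m : Int) : ∀ (n : Nat) (pref : List Int) (y : Int),
    (List.range n).foldl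
      (fun rand _ =>
        let last_num := (PySem.List.pyGet? rand ((rand.length : Int) - 1)).getD 0
        let next_num := PySem.Int.mod (last_num * last_num) m
        rand ++ [next_num])
      (pref ++ [y])
    = pref ++ (orb (bbsF m) y (n + 1)) := by
  intro n
  induction n with
  | zero => intro pref y; simp [orb]
  | succ k ih =>
    intro pref y
    rw [List.range_succ_eq_map, List.foldl_cons, List.foldl_map]
    have hidx : ((pref ++ [y]).length : Int) - 1 = (pref.length : Int) := by simp
    simp only [hidx, PySem.List.pyGet?_append_length, Option.getD_some]
    have := ih (pref ++ [y]) (PySem.Int.mod (y * y) m)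
    simp only [List.append_assoc] at this ⊢
    rw [this]
    congr 1
    rw [List.singleton_append]
    exact (orb_cons (bbsF m) y (k + 1)).symm

-- periodicity: if f^[s+p] x0 = f^[s] x0 then indices beyond s reduce mod p
lemma iter_period (f : Int → Int) (x0 : Int) (s p : Nat) (hp : 0 < p)
    (h : f^[s + p] x0 = f^[s] x0) : ∀ q, f^[s + q] x0 = f^[s + q % p] x0 := by
  intro q
  induction q using Nat.strong_induction_on with
  | _ q ih =>
    by_cases hq : q < p
    · rw [Nat.mod_eq_of_lt hq]
    · have hq' : p ≤ q := by omega
      have h1 : s + q = (q - p) + (s + p) := by omega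
      have h2 : f^[s + q] x0 = f^[s + (q - p)] x0 := by
        rw [h1, Function.iterate_add_apply, h, ← Function.iterate_add_apply,
          Nat.add_comm (q - p) s]
      have h3 : f^[s + (q - p)] x0 = f^[s + (q - p) % p] x0 := ih (q - p) (by omega)
      rw [h2, h3, ← Nat.mod_eq_sub_mod hq']

-- indexing a tiled list
lemma flatten_replicate_getElem {α : Type} : ∀ (r : Nat) (cyc : List α) (q : Nat)
    (hq : q < ((List.replicate r cyc).flatten).length) (hm : q % cyc.length < cyc.length),
    ((List.replicate r cyc).flatten)[q] = cyc[q % cyc.length] := by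
  intro r
  induction r with
  | zero => intro cyc q hq hm; simp at hq
  | succ k ih =>
    intro cyc q hq hm
    have hc : 0 < cyc.length := Nat.lt_of_le_of_lt (Nat.zero_le _) hm
    have hrep : (List.replicate (k + 1) cyc).flatten = cyc ++ (List.replicate k cyc).flatten := by
      rw [List.replicate_succ, List.flatten_cons]
    have hq2 : q < (cyc ++ (List.replicate k cyc).flatten).length := hrep ▸ hq
    rw [List.getElem_of_eq hrep]
    rcases Nat.lt_or_ge q cyc.length with h | h
    · rw [List.getElem_append_left h]
      congr 1
      exact (Nat.mod_eq_of_lt h).symm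
    · have hq' : q - cyc.length < (List.replicate k cyc).flatten.length := by
        simp only [List.length_append] at hq2; omega
      have hm' : (q - cyc.length) % cyc.length < cyc.length := Nat.mod_lt _ hc
      rw [List.getElem_append_right h]
      rw [ih cyc (q - cyc.length) hq' hm']
      congr 1
      exact (Nat.mod_eq_sub_mod h).symm

-- tiling the detected cycle reproduces the rest of the orbit
lemma tile_orbit (f : Int → Int) (x0 : Int) (s j need : Nat) (hs : s < j)
    (hper : f^[j] x0 = f^[s] x0) :
    orb f x0 j ++ List.take need
        (List.flatten (List.replicate (need / ((orb f x0 j).drop s).length + 1)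
          ((orb f x0 j).drop s)))
      = orb f x0 (j + need) := by
  set cyc := (orb f x0 j).drop s with hc
  have hclen : cyc.length = j - s := by simp [hc, orb_length]
  have hp : 0 < cyc.length := by omega
  have hcel : ∀ (q : Nat) (h : q < cyc.length), cyc[q] = f^[s + q] x0 := by
    intro q h
    have hsq : s + q < (orb f x0 j).length := by
      rw [orb_length]; omega
    rw [List.getElem_of_eq hc, List.getElem_drop]
    exact orb_getElem f x0 j (s + q) hsq
  have hflat : ((List.replicate (need / cyc.length + 1) cyc).flatten).length
      = (need / cyc.length + 1) * cyc.length := by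
    simp [List.length_flatten, Nat.mul_comm]
  have hge : need ≤ (need / cyc.length + 1) * cyc.length := by
    have h1 := Nat.div_add_mod need cyc.length
    have h2 := Nat.mod_lt need hp
    nlinarith
  have hsplit : orb f x0 (j + need)
      = orb f x0 j ++ (List.range need).map (fun q => f^[j + q] x0) := by
    simp only [orb, List.range_add, List.map_append, List.map_map]
    rfl
  rw [hsplit]
  congr 1
  apply List.ext_getElem
  · rw [List.length_take, hflat, List.length_map, List.length_range]
    omega
  · intro q h1 h2
    have hqn : q < need := by simpa using h2
    have hqf : q < ((List.replicate (need / cyc.length + 1) cyc).flatten).length := by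
      rw [hflat]; omega
    have hm : q % cyc.length < cyc.length := Nat.mod_lt q hp
    rw [List.getElem_take, flatten_replicate_getElem _ cyc q hqf hm, hcel _ hm]
    simp only [List.getElem_map, List.getElem_range]
    have hper' : f^[s + (j - s)] x0 = f^[s] x0 := by
      rw [show s + (j - s) = j by omega]; exact hper
    have hkey := iter_period f x0 s (j - s) (by omega) hper' ((j - s) + q)
    rw [show s + ((j - s) + q) = j + q by omega] at hkey
    rw [hkey, Nat.add_mod_left, hclen]

-- the loop invariant: from the j-step state, the post-loop code yields the full orbit
lemma bbsB_loop (m x0 : Int) : ∀ (fuel j : Nat) (seen : PySem.Dict Int Int),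
    (∀ v i, PySem.Dict.get? seen v = some i →
        ∃ k : Nat, i = (k : Int) ∧ k < j ∧ (bbsF m)^[k] x0 = v) →
    ∀ buf' seen' x',
      bbsLoopB m fuel (orb (bbsF m) x0 j) seen ((bbsF m)^[j] x0) = (buf', seen', x') →
      (if buf'.length < j + fuel then
        buf' ++ List.take (j + fuel - buf'.length)
          (List.flatten (List.replicate
            ((j + fuel - buf'.length) /
              (buf'.drop ((PySem.Dict.get? seen' x').getD 0).toNat).length + 1)
            (buf'.drop ((PySem.Dict.get? seen' x').getD 0).toNat)))
       else buf') = orb (bbsF m) x0 (j + fuel) := by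
  intro fuel
  induction fuel with
  | zero =>
    intro j seen _ buf' seen' x' heq
    simp only [bbsLoopB] at heq
    injection heq with h1 h23
    injection h23 with h2 h3
    subst h1; subst h2; subst h3
    simp [orb_length]
  | succ fuel ih =>
    intro j seen hseen buf' seen' x' heq
    simp only [bbsLoopB] at heq
    by_cases hmem : (PySem.Dict.get? seen ((bbsF m)^[j] x0)).isSome
    · rw [if_pos hmem] at heq
      injection heq with h1 h23
      injection h23 with h2 h3
      subst h1; subst h2; subst h3
      obtain ⟨i, hi⟩ := Option.isSome_iff_exists.mp hmem
      obtain ⟨s, rfl, hsj, hsx⟩ := hseen _ _ hi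
      have hlen : (orb (bbsF m) x0 j).length = j := orb_length _ _ _
      have hlt : (orb (bbsF m) x0 j).length < j + (fuel + 1) := by omega
      rw [if_pos hlt, hi]
      simp only [Option.getD_some, Int.toNat_natCast, hlen]
      have hmain := tile_orbit (bbsF m) x0 s j (fuel + 1) hsj hsx.symm
      rw [show j + (fuel + 1) - j = fuel + 1 by omega]
      exact hmain
    · rw [if_neg hmem] at heq
      have hstep : orb (bbsF m) x0 j ++ [(bbsF m)^[j] x0] = orb (bbsF m) x0 (j + 1) :=
        (orb_succ _ _ _).symm
      have hx : PySem.Int.mod ((bbsF m)^[j] x0 * (bbsF m)^[j] x0) m = (bbsF m)^[j + 1] x0 :=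
        (Function.iterate_succ_apply' (bbsF m) j x0).symm
      rw [hstep, hx] at heq
      have hseen' : ∀ v i,
          PySem.Dict.get? (PySem.Dict.insert seen ((bbsF m)^[j] x0)
            ((orb (bbsF m) x0 j).length : Int)) v = some i →
          ∃ k : Nat, i = (k : Int) ∧ k < j + 1 ∧ (bbsF m)^[k] x0 = v := by
        intro v i hv
        rw [PySem.Dict.get?_insert] at hv
        split at hv
        · rename_i hveq
          injection hv with hv
          refine ⟨j, ?_, by omega, hveq.symm⟩
          rw [← hv, orb_length]
        · obtain ⟨k, rfl, hk, hkv⟩ := hseen _ _ hv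
          exact ⟨k, rfl, by omega, hkv⟩
      have hrec := ih (j + 1)
        (PySem.Dict.insert seen ((bbsF m)^[j] x0) ((orb (bbsF m) x0 j).length : Int))
        hseen' buf' seen' x' heq
      rwa [show j + 1 + fuel = j + (fuel + 1) by omega] at hrec

-- ===== VERDICT (by name: the statement is the Claim_ definition above) =====
theorem blum_blum_shub_spec : Claim_equal_blum_blum_shub := by
  intro seed amount prime0 prime1 _ _
  unfold Spec_blum_blum_shub blum_blum_shub blum_blum_shub_alt
  by_cases h : amount = 0
  · simp [h]
  · simp only [beq_iff_eq, h, if_false]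
    rcases hB : bbsLoopB (prime0 * prime1) (amount.toNat + 1) [] PySem.Dict.empty seed
      with ⟨buf', seen', x'⟩
    have hempty : ∀ v i, PySem.Dict.get? (PySem.Dict.empty : PySem.Dict Int Int) v = some i →
        ∃ k : Nat, i = (k : Int) ∧ k < 0 ∧ (bbsF (prime0 * prime1))^[k] seed = v := by
      intro v i hv
      rw [PySem.Dict.get?_empty] at hv
      exact absurd hv (by simp)
    have hB' : bbsLoopB (prime0 * prime1) (amount.toNat + 1)
        (orb (bbsF (prime0 * prime1)) seed 0) PySem.Dict.empty
        ((bbsF (prime0 * prime1))^[0] seed) = (buf', seen', x') := hB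
    have hmain := bbsB_loop (prime0 * prime1) seed (amount.toNat + 1) 0 PySem.Dict.empty
      hempty buf' seen' x' hB'
    rw [Nat.zero_add] at hmain
    have hA := bbsA_loop (prime0 * prime1) amount.toNat [] seed
    simp only [List.nil_append] at hA
    rw [hA]
    exact hmain.symm
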